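-- pv_equiv track=rewrite | github.com/Centurywang/MyPythonCode | Python初级/Python快速编程入门/Chapter 5/5_2.py | func
-- ===== SOURCE A (Python) =====
-- def func(strs):
--     A = ''
--     B = ''
--     for x,y in enumerate(strs):
--         if x % 2 == 0:
--             A += y
--         else:
--             B += y
--     return A+B
-- ===== SOURCE B (Python) =====
-- def func(strs):
--     return ''.join(strs[::2]) + ''.join(strs[1::2])
-- ===== Notes on version B (the rewrite author's own statement) =====
-- stated objective: idiomatic
-- what changed: Replaces the indexed loop with a parity test and two string += accumulators by two strided slices strs[::2] and strs[1::2], each joined and then concatenated; no explicit loop or modulo remains.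
import Mathlib
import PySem

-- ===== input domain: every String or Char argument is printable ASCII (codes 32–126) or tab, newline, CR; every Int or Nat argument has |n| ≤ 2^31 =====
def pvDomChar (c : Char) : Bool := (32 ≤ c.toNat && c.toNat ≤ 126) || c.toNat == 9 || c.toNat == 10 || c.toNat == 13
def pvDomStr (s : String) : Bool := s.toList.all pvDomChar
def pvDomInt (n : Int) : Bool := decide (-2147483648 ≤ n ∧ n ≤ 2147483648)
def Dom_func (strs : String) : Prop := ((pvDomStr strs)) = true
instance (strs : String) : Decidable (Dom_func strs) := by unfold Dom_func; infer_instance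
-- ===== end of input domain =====

-- B replaces A's indexed loop with a parity test by two strided slices joined and
-- concatenated (idiomatic rewrite; equal return value on every string input).

-- ===== PORT A =====
-- A: enumerate loop; even indices appended to accumulator A, odd ones to B; return A+B.
def func (strs : String) : String :=
  let p := (PySem.List.enumerate strs.toList 0).foldl
    (fun (ab : List Char × List Char) (xy : Int × Char) =>
      if PySem.Int.mod xy.1 2 = 0 then (ab.1 ++ [xy.2], ab.2) else (ab.1, ab.2 ++ [xy.2]))
    ([], [])
  String.ofList (p.1 ++ p.2)

-- ===== PORT B =====
-- B: ''.join(strs[::2]) + ''.join(strs[1::2]); joining the characters of a string is the string itself.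
def func_alt (strs : String) : String :=
  ((PySem.Str.slice? strs none none 2).getD "") ++ ((PySem.Str.slice? strs (some 1) none 2).getD "")

-- ===== PRECONDITION & SPEC =====
def Spec_func (strs : String) (out : String) : Prop := out = func_alt strs
instance (strs : String) (out : String) : Decidable (Spec_func strs out) := by unfold Spec_func; infer_instance

-- ===== CLAIM (what is proved, stated in full; the proofs are below) =====
def Claim_equal_func : Prop := ∀ (strs : String), Dom_func strs → Spec_func strs (func strs)

-- ===== LEMMAS AND PROOFS =====

-- even-index and odd-index characters of a list, used to characterise both ports
mutual
def pvEvens : List Char → List Char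
  | [] => []
  | x :: xs => x :: pvOdds xs
def pvOdds : List Char → List Char
  | [] => []
  | _ :: xs => pvEvens xs
end

theorem aux_evens : (xs : List Char) → PySem.List.slice? xs none none 2 = some (pvEvens xs)
  | [] => by decide
  | [x] => by
    simp [PySem.List.slice?, PySem.List.sliceIndices, pvEvens, pvOdds]
  | x :: y :: t => by
    have ih := aux_evens t
    simp [PySem.List.slice?, PySem.List.sliceIndices] at ih ⊢
    have hc : (((t.length:Int) + 1 + 1 + 2 - 1) / 2).toNat
        = (if 0 < t.length then (((t.length:Int) + 2 - 1) / 2).toNat else 0) + 1 := by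
      split <;> omega
    rw [if_pos (by omega), hc, List.range_succ_eq_map, List.filterMap_cons]
    have h0 : ((2:Int) * ((0:Nat):Int)).toNat = 0 := by omega
    simp only [h0, List.getElem?_cons_zero, List.filterMap_map, Function.comp_def]
    rw [show (fun (k:Nat) => (x :: y :: t)[(2 * ((k+1:Nat)):Int).toNat]?) = fun (k:Nat) => t[((2:Int)*(k:Int)).toNat]? from by
      funext k
      have h2 : ((2 * ((k+1:Nat)) : Int)).toNat = ((2:Int) * (k:Int)).toNat + 1 + 1 := by push_cast; omega
      rw [h2, List.getElem?_cons_succ, List.getElem?_cons_succ]]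
    rw [ih]
    simp [pvEvens, pvOdds]

theorem aux_odds : (xs : List Char) → PySem.List.slice? xs (some 1) none 2 = some (pvOdds xs)
  | [] => by decide
  | x :: t => by
    have h := aux_evens t
    simp [PySem.List.slice?, PySem.List.sliceIndices] at h ⊢
    rw [show (fun (k:Nat) => (x :: t)[((1 + 2 * (k:Int))).toNat]?) = fun (k:Nat) => t[((2:Int)*(k:Int)).toNat]? from by
      funext k
      have h2 : ((1 + 2 * (k:Int))).toNat = ((2:Int) * (k:Int)).toNat + 1 := by omega
      rw [h2, List.getElem?_cons_succ]]
    rw [h]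
    simp [pvOdds]

theorem fold_enum_parity (xs : List Char) (s : Int) (a b : List Char) :
    ((PySem.List.enumerate xs s).foldl
      (fun (ab : List Char × List Char) (xy : Int × Char) =>
        if PySem.Int.mod xy.1 2 = 0 then (ab.1 ++ [xy.2], ab.2) else (ab.1, ab.2 ++ [xy.2]))
      (a, b)) =
    if PySem.Int.mod s 2 = 0 then (a ++ pvEvens xs, b ++ pvOdds xs)
    else (a ++ pvOdds xs, b ++ pvEvens xs) := by
  induction xs generalizing s a b with
  | nil => simp [PySem.List.enumerate_nil, pvEvens, pvOdds]
  | cons x xs ih =>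
    rw [PySem.List.enumerate_cons, List.foldl_cons, ih (s + 1)]
    have hfm : ∀ z : Int, z.fmod 2 = z % 2 := by
      intro z; rw [Int.fmod_eq_emod]; simp
    have hflip : ((s + 1).fmod 2 = 0) ↔ ¬ (s.fmod 2 = 0) := by
      rw [hfm, hfm]; omega
    by_cases hd : s.fmod 2 = 0 <;>
      simp [PySem.Int.mod, hd, hflip, pvEvens, pvOdds]

-- ===== VERDICT (by name: the statement is the Claim_ definition above) =====
theorem func_spec : Claim_equal_func := by
  intro strs _
  unfold Spec_func func func_alt
  rw [fold_enum_parity]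
  rw [if_pos (by decide)]
  unfold PySem.Str.slice?
  simp only [PySem.Chars.slice?_eq_listSlice?, aux_evens, aux_odds, Option.map_some,
    Option.getD_some, List.nil_append]
  simp
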